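-- pv_equiv track=rewrite | github.com/daradan/parser_CU | utils.py | fix_category
-- ===== SOURCE A (Python) =====
-- def fix_category(category: str) -> str:
--     if ' / ' in category:
--         return ' #'.join(category.split(' / '))
--
--     def fix_category2(category2: str) -> str:
--         need_to_replace = [' ', '-', ',']
--         for change in need_to_replace:
--             if change in category2:
--                 category2 = category2.replace(change, '_')
--         return category2
--
--     if ' & ' in category:
--         temp = []
--         temp_list = category.split(' & ')
--         for text in temp_list:
--             temp.append(fix_category2(text))
--         return ' #'.join(temp)
--     return fix_category2(category)
-- ===== SOURCE B (Python) =====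
-- def fix_category(category: str) -> str:
--     if ' / ' in category:
--         return ' #'.join(category.split(' / '))
--     return ' #'.join(
--         ''.join('_' if c in (' ', '-', ',') else c for c in part)
--         for part in category.split(' & ')
--     )
-- ===== Notes on version B (the rewrite author's own statement) =====
-- stated objective: simpler
-- what changed: Collapsed the ' & ' branch and the plain fallback into one uniform split-map-join expression (split on ' & ' of a string without it yields a singleton), and replaced fix_category2's three guarded .replace passes with a single per-character translation.
import Mathlib
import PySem

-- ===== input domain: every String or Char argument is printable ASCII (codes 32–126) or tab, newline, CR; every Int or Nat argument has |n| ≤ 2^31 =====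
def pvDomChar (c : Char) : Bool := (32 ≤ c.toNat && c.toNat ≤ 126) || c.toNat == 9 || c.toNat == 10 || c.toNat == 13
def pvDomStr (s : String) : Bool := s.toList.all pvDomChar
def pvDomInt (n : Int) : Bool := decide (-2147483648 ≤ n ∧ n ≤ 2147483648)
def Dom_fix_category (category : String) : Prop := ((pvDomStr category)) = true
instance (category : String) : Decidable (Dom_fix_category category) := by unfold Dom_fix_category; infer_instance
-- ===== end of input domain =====

-- B collapses the ' & ' branch and the plain fallback into one split-map-join and replaces the
-- guarded .replace passes with a per-character translation (objective: simpler; same cost).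


-- ===== PORT A =====
-- helper fix_category2: three conditional single-character replaces, in order
def fix_category2 (category2 : String) : String :=
  [" ", "-", ","].foldl
    (fun c2 change => if PySem.Str.isIn change c2 then PySem.Str.replace c2 change "_" else c2)
    category2

def fix_category (category : String) : String :=
  if PySem.Str.isIn " / " category then
    PySem.Str.join " #" ((PySem.Chars.splitOn category.toList (" / ").toList).map String.ofList)
  else if PySem.Str.isIn " & " category then
    let temp := ((PySem.Chars.splitOn category.toList (" & ").toList).map String.ofList).foldl
      (fun acc text => acc ++ [fix_category2 text]) []
    PySem.Str.join " #" temp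
  else fix_category2 category

-- ===== PORT B =====
-- per-character translation: '_' if c in (' ', '-', ',') else c
def fcTr (c : Char) : Char := if c = ' ' ∨ c = '-' ∨ c = ',' then '_' else c

def fix_category_alt (category : String) : String :=
  if PySem.Str.isIn " / " category then
    PySem.Str.join " #" ((PySem.Chars.splitOn category.toList (" / ").toList).map String.ofList)
  else
    PySem.Str.join " #" ((PySem.Chars.splitOn category.toList (" & ").toList).map
      (fun part => String.ofList (part.map fcTr)))

-- ===== PRECONDITION & SPEC =====
def Spec_fix_category (category : String) (out : String) : Prop := out = fix_category_alt category
instance (category : String) (out : String) : Decidable (Spec_fix_category category out) := by unfold Spec_fix_category; infer_instance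

-- ===== CLAIM (what is proved, stated in full; the proofs are below) =====
def Claim_equal_fix_category : Prop := ∀ (category : String), Dom_fix_category category → Spec_fix_category category (fix_category category)

-- ===== LEMMAS AND PROOFS =====

-- single-character replace is a per-character map
theorem replace_go_single (a b : Char) (cs : List Char) : ∀ (fuel : Nat) (acc : List Char),
    cs.length ≤ fuel →
    PySem.Chars.replace.go [a] [b] fuel cs acc
      = acc.reverse ++ cs.map (fun c => if c = a then b else c) := by
  induction cs with
  | nil => intro fuel acc _; cases fuel <;> simp [PySem.Chars.replace.go]
  | cons c t ih =>
    intro fuel acc h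
    cases fuel with
    | zero => simp at h
    | succ n =>
      simp only [PySem.Chars.replace.go]
      by_cases hc : c = a
      · subst hc
        have hpre : [c].isPrefixOf (c :: t) = true := by
          simp
        simp only [hpre, if_true, List.length_singleton, List.drop_succ_cons, List.drop_zero]
        rw [ih n ([b].reverse ++ acc) (by simpa using Nat.le_of_succ_le_succ h)]
        simp
      · have hpre : [a].isPrefixOf (c :: t) = false := by
          rw [Bool.eq_false_iff]
          intro hcontra
          rw [List.isPrefixOf_iff_prefix] at hcontra
          exact hc (List.cons_prefix_cons.mp hcontra).1.symm
        simp only [hpre, Bool.false_eq_true, if_false]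
        rw [ih n (c :: acc) (by simpa using Nat.le_of_succ_le_succ h)]
        simp [hc]

theorem replace_single (cs : List Char) (a b : Char) :
    PySem.Chars.replace cs [a] [b] = cs.map (fun c => if c = a then b else c) := by
  rw [PySem.Chars.replace]
  simp only [List.isEmpty_cons, Bool.false_eq_true, if_false]
  rw [replace_go_single a b cs cs.length [] (le_refl _)]
  simp

-- a guarded single-character replace is the same per-character map whether the char occurs or not
theorem cond_replace (cs : List Char) (a b : Char) :
    (if PySem.Chars.isIn [a] cs = true then PySem.Chars.replace cs [a] [b] else cs)
      = cs.map (fun c => if c = a then b else c) := by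
  by_cases h : PySem.Chars.isIn [a] cs = true
  · simp only [h, if_true]; exact replace_single cs a b
  · have hnm : a ∉ cs := by
      intro hmem
      apply (PySem.Chars.isIn_eq_false_iff [a] cs).mp (Bool.eq_false_iff.mpr h)
      obtain ⟨s1, s2, rfl⟩ := List.mem_iff_append.mp hmem
      exact ⟨s1, s2, by simp⟩
    have hid : cs.map (fun c => if c = a then b else c) = cs := by
      conv_rhs => rw [← List.map_id cs]
      exact List.map_congr_left (fun c hc => by
        have hca : c ≠ a := fun he => hnm (he ▸ hc)
        simp [hca])
    simp [h, hid]

-- one guarded replace step of fix_category2, at the String level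
theorem fc2_step (s : String) (a : Char) (ch : String) (hch : ch.toList = [a]) :
    (if PySem.Str.isIn ch s then PySem.Str.replace s ch "_" else s)
      = String.ofList (s.toList.map (fun c => if c = a then '_' else c)) := by
  rw [PySem.Str.isIn_eq, hch, PySem.Str.replace.eq_1, hch]
  rw [← cond_replace s.toList a '_']
  by_cases h : PySem.Chars.isIn [a] s.toList = true <;> simp [h]

-- fix_category2 is exactly the per-character translation fcTr
theorem fix_category2_eq (s : String) :
    fix_category2 s = String.ofList (s.toList.map fcTr) := by
  unfold fix_category2
  simp only [List.foldl_cons, List.foldl_nil]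
  rw [fc2_step s ' ' " " rfl, fc2_step _ '-' "-" rfl, fc2_step _ ',' "," rfl]
  simp only [String.toList_ofList, List.map_map]
  congr 1
  apply List.map_congr_left
  intro c _
  simp only [Function.comp, fcTr]
  by_cases h1 : c = ' ' <;> by_cases h2 : c = '-' <;> by_cases h3 : c = ',' <;>
    simp_all

-- splitting on a separator that never occurs yields the singleton list
theorem splitOn_go_no_match (sep : List Char) (l : List Char) : ∀ (fuel : Nat)
    (cur : List Char) (acc : List (List Char)),
    (∀ j, ¬ sep <+: l.drop j) →
    PySem.Chars.splitOn.go sep fuel l cur acc = ((cur.reverse ++ l) :: acc).reverse := by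
  induction l with
  | nil => intro fuel cur acc _; cases fuel <;> simp [PySem.Chars.splitOn.go]
  | cons c rest ih =>
    intro fuel cur acc h
    cases fuel with
    | zero => simp [PySem.Chars.splitOn.go]
    | succ n =>
      simp only [PySem.Chars.splitOn.go]
      have hpre : sep.isPrefixOf (c :: rest) = false := by
        rw [Bool.eq_false_iff]
        intro hcontra
        exact h 0 (by simpa using List.isPrefixOf_iff_prefix.mp hcontra)
      simp only [hpre, Bool.false_eq_true, if_false]
      rw [ih n (c :: cur) acc (fun j => by simpa using h (j + 1))]
      simp

theorem splitOn_of_not_isIn (cs sep : List Char) (h : PySem.Chars.isIn sep cs = false) :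
    PySem.Chars.splitOn cs sep = [cs] := by
  rw [PySem.Chars.splitOn]
  rw [splitOn_go_no_match sep cs (cs.length + 1) [] [] (fun j hj => by
    have : PySem.Chars.isIn sep cs = true :=
      (PySem.Chars.exists_prefix_drop_iff_isIn sep cs).mp ⟨j, hj⟩
    simp [this] at h)]
  simp

-- ===== VERDICT (by name: the statement is the Claim_ definition above) =====
theorem fix_category_spec : Claim_equal_fix_category := by
  intro category _
  unfold Spec_fix_category fix_category fix_category_alt
  simp only [PySem.Str.isIn_eq, show (" / " : String).toList = [' ', '/', ' '] from rfl,
    show (" & " : String).toList = [' ', '&', ' '] from rfl]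
  split_ifs with h1 h2
  · rfl
  · rw [PySem.List.foldl_append_singleton_eq_map]
    rw [List.nil_append, List.map_map,
      List.map_congr_left (f := fix_category2 ∘ String.ofList)
        (g := fun part => String.ofList (List.map fcTr part))
        (fun p _ => by simp only [Function.comp_apply]; rw [fix_category2_eq]; simp)]
  · rw [splitOn_of_not_isIn category.toList [' ', '&', ' '] (Bool.eq_false_iff.mpr h2),
      List.map_cons, List.map_nil, fix_category2_eq]
    rw [PySem.Str.join]
    simp [PySem.Chars.join_singleton]
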